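-- pv_equiv track=rewrite | github.com/ecfuzz/ECFuzz | src/testValidator/run_unit_test_utils.py | group_test_by_cls
-- ===== SOURCE A (Python) =====
-- def group_test_by_cls(tests) -> dict:
--     d = {}
--     for t in tests:
--         clsname, method = t.split("#")
--         if clsname not in d:
--             d[clsname] = set()
--         d[clsname].add(method)
--     return d
-- ===== SOURCE B (Python) =====
-- def group_test_by_cls(tests) -> dict:
--     pairs = []
--     for t in tests:
--         clsname, method = t.split("#")
--         pairs.append((clsname, method))
--     return {c: {m for c2, m in pairs if c2 == c} for c, _ in pairs}
-- ===== Notes on version B (the rewrite author's own statement) =====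
-- stated objective: alternative
-- what changed: Replaces the incremental dict-of-sets mutation (create-if-absent, then add) by a two-phase version: first collect all (class, method) pairs, then build the dict in one comprehension whose value for each class is a set comprehension filtering the pair list.
import Mathlib
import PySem

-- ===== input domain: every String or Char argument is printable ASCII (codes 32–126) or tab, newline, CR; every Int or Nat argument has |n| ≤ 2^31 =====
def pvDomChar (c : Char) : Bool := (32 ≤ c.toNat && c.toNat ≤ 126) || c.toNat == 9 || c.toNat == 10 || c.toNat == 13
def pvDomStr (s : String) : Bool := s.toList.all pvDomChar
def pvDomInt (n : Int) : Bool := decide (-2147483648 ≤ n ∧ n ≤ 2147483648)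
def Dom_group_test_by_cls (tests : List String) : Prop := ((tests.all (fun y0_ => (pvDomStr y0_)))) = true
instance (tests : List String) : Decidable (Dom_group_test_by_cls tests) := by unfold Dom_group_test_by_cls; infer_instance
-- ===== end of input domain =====

-- B groups by first collecting the (class, method) pair list, then building the dict by a
-- comprehension that filters that list per class; same return value as A wherever A returns.

-- ===== PORT A =====
-- literal port of A: one pass, create-if-absent then add the method to the class's set
def group_test_by_cls (tests : List String) : List (String × List String) :=
  (tests.foldl (fun d t =>
    match PySem.Str.split? t "#" with
    | some [clsname, method] =>
        (if d.contains clsname then d else d.insert clsname PySem.Set.empty).modify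
          clsname PySem.Set.empty (fun s => PySem.Set.add s method)
    | _ => d)  -- unreachable under Pre_ (Python raises ValueError here)
    PySem.Dict.empty).items

-- ===== PORT B =====
-- literal port of B: first loop builds the pair list, then the dict comprehension
def group_test_by_cls_alt (tests : List String) : List (String × List String) :=
  let pairs : List (String × String) :=
    tests.foldl (fun acc t =>
      let ps := (PySem.Str.split? t "#").getD []
      -- 'clsname, method = t.split("#")': unpack exactly two parts (else Python raises ValueError)
      if ps.length == 2 then acc ++ [(ps.headD "", ps.tail.headD "")] else acc)
      []
  (pairs.foldl (fun d p =>
      d.insert p.1 (PySem.Set.ofList ((pairs.filter (fun q => q.1 == p.1)).map (·.2))))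
    PySem.Dict.empty).items

-- ===== PRECONDITION & SPEC =====
-- Pre_: each test splits on '#' into exactly two parts; otherwise the tuple unpacking raises ValueError in both A and B.
def Pre_group_test_by_cls (tests : List String) : Prop :=
  ∀ t ∈ tests, (PySem.Str.split? t "#").map List.length = some 2
instance (tests : List String) : Decidable (Pre_group_test_by_cls tests) := by unfold Pre_group_test_by_cls; infer_instance
def pvWitness_group_test_by_cls : List String := ["Foo#a", "Foo#b", "Bar#a", "Foo#a"]

def Spec_group_test_by_cls (tests : List String) (out : List (String × List String)) : Prop := out = group_test_by_cls_alt tests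
instance (tests : List String) (out : List (String × List String)) : Decidable (Spec_group_test_by_cls tests out) := by unfold Spec_group_test_by_cls; infer_instance

-- ===== CLAIM (what is proved, stated in full; the proofs are below) =====
def Claim_equal_group_test_by_cls : Prop := ∀ (tests : List String), Dom_group_test_by_cls tests → Pre_group_test_by_cls tests → Spec_group_test_by_cls tests (group_test_by_cls tests)

-- ===== LEMMAS AND PROOFS =====

-- the pair list both ports are about, in recursive form
def pairsOf : List String → List (String × String)
  | [] => []
  | t :: rest =>
    let ps := (PySem.Str.split? t "#").getD []
    if ps.length == 2 then (ps.headD "", ps.tail.headD "") :: pairsOf rest else pairsOf rest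

-- B's pair-collecting loop computes acc ++ pairsOf tests


lemma foldl_pairs_acc (tests : List String) (acc : List (String × String)) :
    tests.foldl (fun acc t =>
      let ps := (PySem.Str.split? t "#").getD []
      if ps.length == 2 then acc ++ [(ps.headD "", ps.tail.headD "")] else acc) acc
    = acc ++ pairsOf tests := by
  rw [PySem.List.foldl_append_if]
  congr 1
  induction tests with
  | nil => simp [pairsOf]
  | cons t rest ih =>
    simp only [pairsOf, List.filter_cons]
    by_cases h : (((PySem.Str.split? t "#").getD []).length == 2) = true
    · rw [if_pos h, if_pos h, List.map_cons, ih]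
    · rw [if_neg h, if_neg h, ih]

-- A's compound step (create-if-absent, then add) is a single modify
lemma stepA_eq_modify (d : PySem.Dict String (PySem.Set String)) (c m : String) :
    (if d.contains c then d else d.insert c PySem.Set.empty).modify
      c PySem.Set.empty (fun s => PySem.Set.add s m)
    = d.modify c PySem.Set.empty (fun s => PySem.Set.add s m) := by
  by_cases h : d.contains c = true
  · simp [h]
  · simp only [Bool.not_eq_true] at h
    simp only [h, Bool.false_eq_true, if_false]
    apply PySem.Dict.ext
    simp only [PySem.Dict.modify, PySem.Dict.getD_insert_self, PySem.Dict.insert_insert_self,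
      PySem.Dict.getD_of_not_contains d _ h]

-- A's loop over tests is the modify-loop over the pair list
lemma loopA_eq_pairs (tests : List String) (h : Pre_group_test_by_cls tests)
    (d : PySem.Dict String (PySem.Set String)) :
    tests.foldl (fun d t =>
      match PySem.Str.split? t "#" with
      | some [clsname, method] =>
          (if d.contains clsname then d else d.insert clsname PySem.Set.empty).modify
            clsname PySem.Set.empty (fun s => PySem.Set.add s method)
      | _ => d) d
    = (pairsOf tests).foldl
        (fun d p => d.modify p.1 PySem.Set.empty (fun s => PySem.Set.add s p.2)) d := by
  induction tests generalizing d with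
  | nil => simp [pairsOf]
  | cons t rest ih =>
    have ht := h t (by simp)
    rcases hs : PySem.Str.split? t "#" with _ | (_ | ⟨c, _ | ⟨m, _ | _⟩⟩) <;>
      simp [hs] at ht
    have h1 : pairsOf (t :: rest) = (c, m) :: pairsOf rest := by simp [pairsOf, hs]
    have h2 : (match PySem.Str.split? t "#" with
        | some [clsname, method] =>
            (if d.contains clsname = true then d else d.insert clsname PySem.Set.empty).modify
              clsname PySem.Set.empty (fun s => PySem.Set.add s method)
        | _ => d) = d.modify c PySem.Set.empty (fun s => PySem.Set.add s m) := by
      rw [hs]; exact stepA_eq_modify d c m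
    simp only [h1, List.foldl_cons]
    rw [h2]
    exact ih (fun x hx => h x (by simp [hx])) _

-- value of the modify-loop at any key
lemma getD_loopA (l : List (String × String)) (d : PySem.Dict String (PySem.Set String)) (c : String) :
    (l.foldl (fun d p => d.modify p.1 PySem.Set.empty (fun s => PySem.Set.add s p.2)) d).getD c PySem.Set.empty
    = PySem.Set.update (d.getD c PySem.Set.empty) ((l.filter (fun q => q.1 == c)).map (·.2)) := by
  induction l generalizing d with
  | nil => simp [PySem.Set.update]
  | cons p rest ih =>
    simp only [List.foldl_cons, ih]
    by_cases h : p.1 = c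
    · subst h
      simp [PySem.Dict.getD_modify_self, PySem.Set.update_cons]
    · have hne : c ≠ p.1 := fun hh => h hh.symm
      simp [PySem.Dict.getD_modify_of_ne _ _ _ hne, h]

-- value of B's insert-loop at any key
lemma getD_loopB (l : List (String × String)) (V : String → PySem.Set String)
    (d : PySem.Dict String (PySem.Set String)) (c : String) :
    (l.foldl (fun d p => d.insert p.1 (V p.1)) d).getD c PySem.Set.empty
    = if c ∈ l.map (·.1) then V c else d.getD c PySem.Set.empty := by
  induction l generalizing d with
  | nil => simp
  | cons p rest ih =>
    simp only [List.foldl_cons, ih, List.map_cons, List.mem_cons]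
    by_cases h : c ∈ rest.map (·.1)
    · simp [h]
    · by_cases hc : c = p.1 <;> simp [h, hc, PySem.Dict.getD_insert]

-- the two grouped dicts have the same items, for any pair list
lemma items_eq (l : List (String × String)) :
    (l.foldl (fun d p => d.modify p.1 PySem.Set.empty (fun s => PySem.Set.add s p.2))
        PySem.Dict.empty).items
    = (l.foldl (fun d p =>
          d.insert p.1 (PySem.Set.ofList ((l.filter (fun q => q.1 == p.1)).map (·.2))))
        PySem.Dict.empty).items := by
  have hkA : (l.foldl (fun d p => d.modify p.1 PySem.Set.empty (fun s => PySem.Set.add s p.2))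
      PySem.Dict.empty).keys = PySem.Set.ofList (l.map (·.1)) := by
    rw [PySem.Dict.keys_foldl_modify_key l (·.1) PySem.Set.empty
      (fun _ p s => PySem.Set.add s p.2)]
    simp [PySem.Set.update_nil_left]
  have hkB : (l.foldl (fun d p =>
      d.insert p.1 (PySem.Set.ofList ((l.filter (fun q => q.1 == p.1)).map (·.2))))
      PySem.Dict.empty).keys = PySem.Set.ofList (l.map (·.1)) := by
    rw [PySem.Dict.keys_foldl_insert_key l (·.1)
      (fun _ p => PySem.Set.ofList ((l.filter (fun q => q.1 == p.1)).map (·.2)))]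
    simp [PySem.Set.update_nil_left]
  rw [PySem.Dict.items_eq_map_keys _ (by rw [hkA]; exact PySem.Set.nodup_ofList _) PySem.Set.empty,
      PySem.Dict.items_eq_map_keys _ (by rw [hkB]; exact PySem.Set.nodup_ofList _) PySem.Set.empty,
      hkA, hkB]
  apply List.map_congr_left
  intro k hk
  have hk' : k ∈ l.map (·.1) := (PySem.Set.mem_ofList _ _).1 hk
  have hA := getD_loopA l PySem.Dict.empty k
  have hB := getD_loopB l
    (fun c => PySem.Set.ofList ((l.filter (fun q => q.1 == c)).map (·.2))) PySem.Dict.empty k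
  simp only [hk', if_true] at hB
  simp only [PySem.Dict.getD_empty, PySem.Set.update_empty] at hA
  rw [hA, hB]

-- ===== VERDICT (by name: the statement is the Claim_ definition above) =====
theorem group_test_by_cls_spec : Claim_equal_group_test_by_cls := by
  intro tests _ hpre
  unfold Spec_group_test_by_cls group_test_by_cls group_test_by_cls_alt
  rw [loopA_eq_pairs tests hpre, foldl_pairs_acc]
  simp only [List.nil_append]
  exact items_eq (pairsOf tests)
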